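-- pv_equiv track=rewrite | github.com/JHorcasitas/Sobre-La-Dificultad-De-Entrenar-Redes-Profundas | simpleNet.py | maxPool_layers
-- ===== SOURCE A (Python) =====
-- def maxPool_layers(num_layers, num_maxPool):
--
-- 	'''
-- 	Regresa una lista que contiene los índices en
-- 	los cuales aplicar una capa de muestreo
-- 	'''
--
-- 	spacing   = int(num_layers / (num_maxPool + 1))
-- 	remainder = num_layers % (num_maxPool + 1)
--
-- 	indexes   = [ spacing for _ in range(num_maxPool)]
--
-- 	for i in range(remainder):
-- 		indexes[i] += 1
--
-- 	for i in range((len(indexes)-1), -1, -1):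
-- 		indexes[i] = sum(indexes[0:i+1])
--
-- 	indexes = [ element - 1 for element in indexes]
--
-- 	return indexes
-- ===== SOURCE B (Python) =====
-- def maxPool_layers(num_layers, num_maxPool):
--     # Closed form: i-th index is the prefix sum (i+1)*q + min(i+1, r), minus 1.
--     q = int(num_layers / (num_maxPool + 1))
--     r = num_layers % (num_maxPool + 1)
--     return [(i + 1) * q + min(i + 1, r) - 1 for i in range(num_maxPool)]
-- ===== Notes on version B (the rewrite author's own statement) =====
-- stated objective: faster
-- what changed: Replaces the quadratic build-then-resum pipeline (a list of spacings, an increment loop, and a backward loop that recomputes sum(indexes[0:i+1]) for each i) by a single comprehension with the closed form (i+1)*q + min(i+1, r) - 1.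
import Mathlib
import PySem

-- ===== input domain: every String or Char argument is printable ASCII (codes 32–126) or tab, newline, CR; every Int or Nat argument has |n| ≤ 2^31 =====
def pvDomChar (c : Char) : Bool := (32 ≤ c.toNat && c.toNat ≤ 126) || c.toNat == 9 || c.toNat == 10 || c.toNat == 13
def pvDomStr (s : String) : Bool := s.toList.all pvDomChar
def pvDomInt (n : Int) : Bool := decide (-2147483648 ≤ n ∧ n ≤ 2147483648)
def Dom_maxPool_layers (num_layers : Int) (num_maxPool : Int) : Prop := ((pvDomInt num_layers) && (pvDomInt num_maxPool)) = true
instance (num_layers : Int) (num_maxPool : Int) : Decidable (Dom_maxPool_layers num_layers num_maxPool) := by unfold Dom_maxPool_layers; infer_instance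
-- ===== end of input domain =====

-- B replaces A's quadratic build-then-resum pipeline by the closed form (i+1)*q + min(i+1,r) - 1 (objective: faster, O(n) vs O(n^2)).

-- ===== PORT A =====
-- literal transliteration of A: spacing via int(a/b) (= truncdiv, exact on Dom), floor mod,
-- a constant list, an increment loop, a backward loop rewriting indexes[i] := sum(indexes[0:i+1]), then -1 on each.
def maxPool_layers (num_layers : Int) (num_maxPool : Int) : List Int :=
  let spacing := PySem.Int.truncdiv num_layers (num_maxPool + 1)
  let remainder := PySem.Int.mod num_layers (num_maxPool + 1)
  let indexes := (PySem.List.pyRange 0 num_maxPool 1).map (fun _ => spacing)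
  let indexes := (PySem.List.pyRange 0 remainder 1).foldl
      (fun xs i => PySem.List.pySetD xs i (PySem.List.pyGetD xs i 0 + 1)) indexes
  let indexes := (PySem.List.pyRange ((indexes.length : Int) - 1) (-1) (-1)).foldl
      (fun xs i => PySem.List.pySetD xs i ((PySem.List.slice xs (some 0) (some (i + 1))).sum)) indexes
  indexes.map (fun element => element - 1)

-- ===== PORT B =====
def maxPool_layers_alt (num_layers : Int) (num_maxPool : Int) : List Int :=
  let q := PySem.Int.truncdiv num_layers (num_maxPool + 1)
  let r := PySem.Int.mod num_layers (num_maxPool + 1)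
  (PySem.List.pyRange 0 num_maxPool 1).map (fun i => (i + 1) * q + min (i + 1) r - 1)

-- ===== PRECONDITION & SPEC =====
-- A raises ZeroDivisionError exactly when num_maxPool = -1.
def Pre_maxPool_layers (num_layers : Int) (num_maxPool : Int) : Prop := num_maxPool ≠ -1
instance (num_layers : Int) (num_maxPool : Int) : Decidable (Pre_maxPool_layers num_layers num_maxPool) := by unfold Pre_maxPool_layers; infer_instance
def pvWitness_maxPool_layers : Int × Int := (10, 3)

def Spec_maxPool_layers (num_layers : Int) (num_maxPool : Int) (out : List Int) : Prop := out = maxPool_layers_alt num_layers num_maxPool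
instance (num_layers : Int) (num_maxPool : Int) (out : List Int) : Decidable (Spec_maxPool_layers num_layers num_maxPool out) := by unfold Spec_maxPool_layers; infer_instance

-- ===== CLAIM (what is proved, stated in full; the proofs are below) =====
def Claim_equal_maxPool_layers : Prop := ∀ (num_layers : Int) (num_maxPool : Int), Dom_maxPool_layers num_layers num_maxPool → Pre_maxPool_layers num_layers num_maxPool → Spec_maxPool_layers num_layers num_maxPool (maxPool_layers num_layers num_maxPool)

-- ===== LEMMAS AND PROOFS =====

-- set on a mapped range is a pointwise update
theorem pv_set_map_range (n k : Nat) (_hk : k < n) (g : Nat → Int) (v : Int) :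
    ((List.range n).map g).set k v = (List.range n).map (fun j => if j = k then v else g j) := by
  apply List.ext_getElem (by simp)
  intro i h1 h2
  simp only [List.getElem_set, List.getElem_map, List.getElem_range]
  by_cases h : i = k
  · simp [h]
  · simp [h, Ne.symm h]

-- A's increment loop on a mapped range
theorem pv_incr_loop (n : Nat) (r : Nat) (hr : r ≤ n) (f : Nat → Int) :
    (PySem.List.pyRange 0 (r : Int) 1).foldl
        (fun xs i => PySem.List.pySetD xs i (PySem.List.pyGetD xs i 0 + 1))
        ((List.range n).map f)
      = (List.range n).map (fun k => if k < r then f k + 1 else f k) := by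
  induction r with
  | zero =>
    rw [Nat.cast_zero, PySem.List.pyRange_one_eq_nil (le_refl 0)]
    simp
  | succ r ih =>
    have hrn : r < n := Nat.lt_of_lt_of_le (Nat.lt_succ_self r) hr
    have hcast : ((r + 1 : Nat) : Int) = (r : Int) + 1 := by push_cast; ring
    rw [hcast, PySem.List.pyRange_one_succ_right (Int.natCast_nonneg r), List.foldl_append,
      ih (Nat.le_of_lt hrn)]
    simp only [List.foldl_cons, List.foldl_nil]
    rw [PySem.List.pySetD_natCast, PySem.List.pyGetD_natCast,
      PySem.List.getD_map_range _ _ _ _ hrn]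
    simp only [lt_irrefl]
    rw [pv_set_map_range n r hrn]
    apply List.map_congr_left
    intro x hx
    by_cases h : x = r
    · simp [h]
    · by_cases h2 : x < r <;> simp [h, h2] <;> omega

-- A's backward prefix-sum loop on a mapped range
theorem pv_back_loop (n : Nat) (g : Nat → Int) (m : Nat) (hm : m ≤ n) :
    (PySem.List.pyRange ((m : Int) - 1) (-1) (-1)).foldl
        (fun xs i => PySem.List.pySetD xs i ((PySem.List.slice xs (some 0) (some (i + 1))).sum))
        ((List.range n).map (fun k => if k < m then g k else ((List.range (k + 1)).map g).sum))
      = (List.range n).map (fun k => ((List.range (k + 1)).map g).sum) := by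
  induction m with
  | zero =>
    rw [Nat.cast_zero, PySem.List.pyRange_neg_one_eq_nil (by norm_num)]
    simp
  | succ m ih =>
    have hmn : m < n := Nat.lt_of_lt_of_le (Nat.lt_succ_self m) hm
    have h1 : ((m + 1 : Nat) : Int) - 1 = (m : Int) := by push_cast; ring
    rw [h1, PySem.List.pyRange_neg_one_cons (by omega), List.foldl_cons]
    rw [PySem.List.slice_zero_start, PySem.List.slice_to _ (by positivity)]
    have h2 : ((m : Int) + 1).toNat = m + 1 := by omega
    rw [h2, ← List.map_take, List.take_range, Nat.min_eq_left hm]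
    have h3 : (List.range (m + 1)).map
        (fun k => if k < m + 1 then g k else ((List.range (k + 1)).map g).sum)
        = (List.range (m + 1)).map g := by
      apply List.map_congr_left
      intro x hx
      simp only [List.mem_range] at hx
      simp [hx]
    rw [h3, PySem.List.pySetD_natCast, pv_set_map_range n m hmn]
    have h4 : (List.range n).map
        (fun j => if j = m then ((List.range (m + 1)).map g).sum
          else if j < m + 1 then g j else ((List.range (j + 1)).map g).sum)
        = (List.range n).map (fun k => if k < m then g k else ((List.range (k + 1)).map g).sum) := by
      apply List.map_congr_left
      intro x hx
      by_cases h : x = m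
      · simp [h]
      · by_cases h5 : x < m
        · simp [h, h5, Nat.lt_succ_of_lt h5]
        · simp [h, h5, show ¬ x < m + 1 by omega]
    rw [h4, ih (Nat.le_of_lt hmn)]

-- closed form of the prefix sum of spacings
theorem pv_sum_closed (r : Nat) (q : Int) (m : Nat) :
    ((List.range m).map (fun j => if j < r then q + 1 else q)).sum
      = m * q + min (m : Int) (r : Int) := by
  induction m with
  | zero => simp
  | succ m ih =>
    rw [List.range_succ, List.map_append, List.sum_append, ih]
    by_cases h : m < r
    · rw [min_eq_left (by exact_mod_cast Nat.le_of_lt h),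
        min_eq_left (by exact_mod_cast h)]
      simp [h]; ring
    · rw [min_eq_right (by exact_mod_cast Nat.le_of_not_lt h),
        min_eq_right (by exact_mod_cast Nat.le_of_succ_le (Nat.succ_le_of_lt (Nat.lt_succ_of_le (Nat.le_of_not_lt h))))]
      simp [h]; ring

-- ===== VERDICT (by name: the statement is the Claim_ definition above) =====
theorem maxPool_layers_spec : Claim_equal_maxPool_layers := by
  intro nl nm hdom hpre
  unfold Spec_maxPool_layers maxPool_layers maxPool_layers_alt
  by_cases hb : 0 < nm
  · -- positive num_maxPool: the real computation
    obtain ⟨n, hn⟩ : ∃ n : Nat, nm = (n : Int) := ⟨nm.toNat, by omega⟩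
    set q := PySem.Int.truncdiv nl (nm + 1) with hq
    set r := PySem.Int.mod nl (nm + 1) with hr
    have hr0 : 0 ≤ r := PySem.Int.mod_nonneg nl (by omega)
    have hrb : r < nm + 1 := PySem.Int.mod_lt nl (by omega)
    obtain ⟨rn, hrn⟩ : ∃ rn : Nat, r = (rn : Int) := ⟨r.toNat, by omega⟩
    have hrnn : rn ≤ n := by omega
    simp only [hn, PySem.List.pyRange_zero_natCast, List.map_map, Function.comp_def]
    rw [hrn, pv_incr_loop n rn hrnn (fun _ => q)]
    rw [List.length_map, List.length_range]
    have hinit : (List.range n).map (fun k => if k < rn then q + 1 else q)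
        = (List.range n).map (fun k => if k < n then (fun j => if j < rn then q + 1 else q) k
            else ((List.range (k + 1)).map (fun j => if j < rn then q + 1 else q)).sum) := by
      apply List.map_congr_left
      intro x hx
      simp only [List.mem_range] at hx
      simp [hx]
    rw [hinit, pv_back_loop n (fun j => if j < rn then q + 1 else q) n (le_refl n), List.map_map]
    apply List.map_congr_left
    intro x hx
    simp only [Function.comp_def, pv_sum_closed]
    push_cast
    ring
  · -- num_maxPool ≤ 0 (and ≠ -1): everything is empty
    have hb0 : nm ≤ 0 := le_of_not_gt hb
    have hr0 : PySem.Int.mod nl (nm + 1) ≤ 0 := by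
      by_cases h : nm = 0
      · have := PySem.Int.mod_lt nl (b := nm + 1) (by omega)
        omega
      · exact (PySem.Int.mod_neg_bounds nl (by unfold Pre_maxPool_layers at hpre; omega)).2
    simp only [PySem.List.pyRange_one_eq_nil hb0, PySem.List.pyRange_one_eq_nil hr0,
      List.map_nil, List.foldl_nil, List.length_nil]
    simp
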